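-- pv_equiv track=rewrite | github.com/benxiao/synth_data | sample_data.py | get_group_rank
-- ===== SOURCE A (Python) =====
-- def get_group_rank(family_ids):
--     prev = None
--     k = 1
--     result = []
--     for fi in family_ids:
--         if prev != fi:
--             k = 1
--         result.append(k)
--         k += 1
--         prev = fi
--     return result
-- ===== SOURCE B (Python) =====
-- def get_group_rank(family_ids):
--     # run boundaries: positions where a new run starts (besides 0), found by
--     # comparing each adjacent pair once
--     breaks = [i + 1 for i, (a, b) in enumerate(zip(family_ids, family_ids[1:])) if a != b]
--     bounds = [0] + breaks + [len(family_ids)]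
--     result = []
--     for s, e in zip(bounds, bounds[1:]):
--         result.extend(range(1, e - s + 1))
--     return result
-- ===== Notes on version B (the rewrite author's own statement) =====
-- stated objective: alternative
-- what changed: Instead of threading prev/k state through one streaming loop, B first computes the run-boundary index list by comparing adjacent pairs, then emits range(1, e-s+1) for each consecutive pair of boundaries.
import Mathlib
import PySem

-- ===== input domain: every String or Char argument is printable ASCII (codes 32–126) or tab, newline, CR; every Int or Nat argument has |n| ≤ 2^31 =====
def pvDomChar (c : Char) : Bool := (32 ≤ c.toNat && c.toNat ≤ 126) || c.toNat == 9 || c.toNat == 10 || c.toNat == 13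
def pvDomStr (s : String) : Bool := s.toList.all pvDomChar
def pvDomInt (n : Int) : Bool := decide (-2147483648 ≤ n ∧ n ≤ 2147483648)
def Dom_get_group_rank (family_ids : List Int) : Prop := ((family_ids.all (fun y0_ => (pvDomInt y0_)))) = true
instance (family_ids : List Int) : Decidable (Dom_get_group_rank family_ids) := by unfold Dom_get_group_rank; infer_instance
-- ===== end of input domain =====

-- B replaces A's streaming prev/k loop by a staged computation: first the list of
-- run-boundary indices (adjacent-pair comparison), then one rank range per pair of
-- consecutive boundaries (objective: alternative).

-- ===== PORT A =====
-- one step of A's loop: state (prev, k, result)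
def pvStepA (s : Option Int × Int × List Int) (fi : Int) : Option Int × Int × List Int :=
  let k := if s.1 ≠ some fi then (1 : Int) else s.2.1
  (some fi, k + 1, s.2.2 ++ [k])

def get_group_rank (family_ids : List Int) : List Int :=
  (family_ids.foldl pvStepA (none, 1, [])).2.2

-- ===== PORT B =====
-- result.extend(range(1, e - s + 1)) for one (s, e) pair
def pvPairSE (acc : List Int) (se : Int × Int) : List Int :=
  acc ++ PySem.List.pyRange 1 (se.2 - se.1 + 1) 1

def get_group_rank_alt (family_ids : List Int) : List Int :=
  -- breaks = [i + 1 for i, (a, b) in enumerate(zip(family_ids, family_ids[1:])) if a != b]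
  let breaks := (PySem.List.enumerate (family_ids.zip (PySem.List.slice family_ids (some 1) none)) 0).filterMap
      (fun p => if p.2.1 ≠ p.2.2 then some (p.1 + 1) else none)
  -- bounds = [0] + breaks + [len(family_ids)]
  let bounds := (0 : Int) :: (breaks ++ [(family_ids.length : Int)])
  -- for s, e in zip(bounds, bounds[1:]): result.extend(range(1, e - s + 1))
  (bounds.zip bounds.tail).foldl pvPairSE []

-- ===== PRECONDITION & SPEC =====
def Spec_get_group_rank (family_ids : List Int) (out : List Int) : Prop := out = get_group_rank_alt family_ids
instance (family_ids : List Int) (out : List Int) : Decidable (Spec_get_group_rank family_ids out) := by unfold Spec_get_group_rank; infer_instance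

-- ===== CLAIM (what is proved, stated in full; the proofs are below) =====
def Claim_equal_get_group_rank : Prop := ∀ (family_ids : List Int), Dom_get_group_rank family_ids → Spec_get_group_rank family_ids (get_group_rank family_ids)

-- ===== LEMMAS AND PROOFS =====

-- canonical run recursion both ports are reduced to
def pvTakeRun (x : Int) : List Int → Nat × List Int
  | [] => (0, [])
  | y :: ys => if y = x then
      let p := pvTakeRun x ys
      (p.1 + 1, p.2)
    else (0, y :: ys)

theorem pvTakeRun_len_le (x : Int) : ∀ xs : List Int, (pvTakeRun x xs).2.length ≤ xs.length := by
  intro xs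
  induction xs with
  | nil => simp [pvTakeRun]
  | cons y ys ih =>
    by_cases h : y = x
    · simp [pvTakeRun, h]; omega
    · simp [pvTakeRun, h]

def pvCanon : List Int → List Int
  | [] => []
  | x :: xs =>
    let p := pvTakeRun x xs
    ((List.range (p.1 + 1)).map (fun i : Nat => (i : Int) + 1)) ++ pvCanon p.2
termination_by l => l.length
decreasing_by
  have := pvTakeRun_len_le x xs
  simp only [List.length_cons]
  omega

theorem pvCanon_nil : pvCanon [] = [] := by
  rw [pvCanon.eq_def]

theorem pvCanon_cons (x : Int) (xs : List Int) :
    pvCanon (x :: xs) =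
      ((List.range ((pvTakeRun x xs).1 + 1)).map (fun i : Nat => (i : Int) + 1))
        ++ pvCanon (pvTakeRun x xs).2 := by
  rw [pvCanon.eq_def]

theorem pvTakeRun_cons_eq (x : Int) (ys : List Int) :
    pvTakeRun x (x :: ys) = ((pvTakeRun x ys).1 + 1, (pvTakeRun x ys).2) := by
  simp [pvTakeRun]

theorem pvTakeRun_cons_ne (x y : Int) (ys : List Int) (h : y ≠ x) :
    pvTakeRun x (y :: ys) = (0, y :: ys) := by
  simp [pvTakeRun, h]

theorem pvTakeRun_len (x : Int) : ∀ xs : List Int,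
    xs.length = (pvTakeRun x xs).1 + (pvTakeRun x xs).2.length := by
  intro xs
  induction xs with
  | nil => simp [pvTakeRun]
  | cons y ys ih =>
    by_cases h : y = x
    · subst h; simp [pvTakeRun_cons_eq]; omega
    · simp [pvTakeRun_cons_ne x y ys h]

-- ---- A-side: fold = canon ----

theorem pvFoldA_acc (xs : List Int) : ∀ (p : Option Int) (k : Int) (acc : List Int),
    (xs.foldl pvStepA (p, k, acc)).2.2 = acc ++ (xs.foldl pvStepA (p, k, [])).2.2 := by
  induction xs with
  | nil => intro p k acc; simp
  | cons y ys ih =>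
    intro p k acc
    simp only [List.foldl_cons, pvStepA, List.nil_append]
    rw [ih _ _ (acc ++ [if p ≠ some y then 1 else k]),
        ih _ _ ([if p ≠ some y then 1 else k])]
    simp

theorem pvRange_shift (n : Nat) (k : Int) :
    (List.range (n + 1)).map (fun i : Nat => k + (i : Int)) =
      k :: (List.range n).map (fun i : Nat => (k + 1) + (i : Int)) := by
  rw [List.range_succ_eq_map, List.map_cons, List.map_map]
  congr 1
  · simp
  · apply List.map_congr_left
    intro a _
    simp only [Function.comp]
    push_cast
    ring

theorem pvOnePlus (n : Nat) :
    (List.range n).map (fun i : Nat => (i : Int) + 1) = (List.range n).map (fun i : Nat => (1 : Int) + (i : Int)) := by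
  apply List.map_congr_left
  intro a _
  ring

theorem pvCont (xs : List Int) : ∀ (x k : Int),
    (xs.foldl pvStepA (some x, k, [])).2.2 =
      ((List.range (pvTakeRun x xs).1).map (fun i : Nat => k + (i : Int)))
        ++ pvCanon (pvTakeRun x xs).2 := by
  induction xs with
  | nil => intro x k; simp [pvTakeRun, pvCanon_nil]
  | cons y ys ih =>
    intro x k
    by_cases h : y = x
    · subst h
      have hk : ¬ (some y ≠ some y) := by simp
      simp only [List.foldl_cons, pvStepA, if_neg hk, pvTakeRun_cons_eq, List.nil_append]
      rw [pvFoldA_acc, ih, pvRange_shift]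
      simp
    · have hne : some x ≠ some y := by simpa using Ne.symm h
      simp only [List.foldl_cons, pvStepA, if_pos hne, pvTakeRun_cons_ne x y ys h,
        List.nil_append]
      rw [pvFoldA_acc, ih y (1 + 1), pvCanon_cons, pvOnePlus, pvRange_shift]
      simp

theorem pvA_eq_canon (xs : List Int) : get_group_rank xs = pvCanon xs := by
  unfold get_group_rank
  cases xs with
  | nil => simp [pvCanon_nil]
  | cons y ys =>
    have hne : (none : Option Int) ≠ some y := by simp
    simp only [List.foldl_cons, pvStepA, if_pos hne, List.nil_append]
    rw [pvFoldA_acc, pvCont ys y (1 + 1), pvCanon_cons, pvOnePlus, pvRange_shift]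
    simp

-- ---- B-side: breaks/bounds emission = canon ----

def pvF : Int × Int × Int → Option Int := fun p => if p.2.1 ≠ p.2.2 then some (p.1 + 1) else none

def pvGB (s : Int) (ps : List (Int × Int)) : List Int :=
  (PySem.List.enumerate ps s).filterMap pvF

def pvBreaks (s : Int) (l : List Int) : List Int := pvGB s (l.zip l.tail)

def pvG (se : Int × Int) : List Int := PySem.List.pyRange 1 (se.2 - se.1 + 1) 1

def pvBounds (l : List Int) : List Int := 0 :: (pvBreaks 0 l ++ [(l.length : Int)])

def pvEmit (l : List Int) : List Int := ((pvBounds l).zip (pvBounds l).tail).flatMap pvG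

theorem pvGB_cons (s : Int) (p : Int × Int) (ps : List (Int × Int)) :
    pvGB s (p :: ps) = (if p.1 ≠ p.2 then [s + 1] else []) ++ pvGB (s + 1) ps := by
  by_cases h : p.1 = p.2
  · simp [pvGB, PySem.List.enumerate_cons, pvF, h]
  · simp [pvGB, PySem.List.enumerate_cons, pvF, h]

theorem pvGB_shift (ps : List (Int × Int)) : ∀ s : Int, pvGB s ps = (pvGB 0 ps).map (· + s) := by
  induction ps with
  | nil => intro s; simp [pvGB, PySem.List.enumerate_nil]
  | cons p ps ih =>
    intro s
    rw [pvGB_cons, pvGB_cons, ih (s + 1), ih (0 + 1), List.map_append, List.map_map]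
    congr 1
    · split_ifs with h
      · simp only [List.map_cons, List.map_nil]
        congr 1
        omega
      · simp
    · apply List.map_congr_left
      intro a _
      simp only [Function.comp]
      ring

theorem pvBreaks_cons2 (s x y : Int) (t : List Int) :
    pvBreaks s (x :: y :: t) =
      (if x ≠ y then [s + 1] else []) ++ pvBreaks (s + 1) (y :: t) := by
  by_cases h : x = y
  · simp [pvBreaks, pvGB, PySem.List.enumerate_cons, pvF, h]
  · simp [pvBreaks, pvGB, PySem.List.enumerate_cons, pvF, h]

theorem pvBreaks_shift1 (l : List Int) : pvBreaks 1 l = (pvBreaks 0 l).map (· + 1) := by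
  unfold pvBreaks
  exact pvGB_shift _ 1

theorem pvBreaks_run : ∀ (xs : List Int) (x : Int),
    pvBreaks 0 (x :: xs) =
      if (pvTakeRun x xs).2 = [] then []
      else (((pvTakeRun x xs).1 : Int) + 1) ::
        (pvBreaks 0 (pvTakeRun x xs).2).map (· + (((pvTakeRun x xs).1 : Int) + 1)) := by
  intro xs
  induction xs with
  | nil => intro x; simp [pvBreaks, pvGB, pvTakeRun, PySem.List.enumerate_nil]
  | cons y ys ih =>
    intro x
    by_cases h : y = x
    · subst h
      have h1 : pvBreaks 0 (y :: y :: ys) = (pvBreaks 0 (y :: ys)).map (· + 1) := by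
        rw [show pvBreaks 0 (y :: y :: ys) = (if y ≠ y then [(0:Int) + 1] else []) ++ pvBreaks (0 + 1) (y :: ys) from pvBreaks_cons2 0 y y ys]
        simp [pvBreaks_shift1]
      rw [h1, ih y, pvTakeRun_cons_eq]
      by_cases hr : (pvTakeRun y ys).2 = []
      · simp [hr]
      · simp only [hr, if_false, List.map_cons, List.map_map, List.cons.injEq]
        refine ⟨by push_cast; ring, ?_⟩
        apply List.map_congr_left
        intro a _
        simp only [Function.comp]
        push_cast
        ring
    · have hne : x ≠ y := Ne.symm h
      rw [pvBreaks_cons2 0 x y ys, if_pos hne, pvTakeRun_cons_ne x y ys h]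
      simp [pvBreaks_shift1]

theorem pvFold_pvPairSE (ps : List (Int × Int)) : ∀ init : List Int,
    ps.foldl pvPairSE init = init ++ ps.flatMap pvG := by
  induction ps with
  | nil => intro init; simp
  | cons p ps ih =>
    intro init
    simp only [List.foldl_cons, List.flatMap_cons, pvPairSE]
    rw [ih]
    simp [pvG, List.append_assoc]

theorem pvG_zero (m : Nat) :
    pvG (0, (m : Int)) = (List.range m).map (fun i : Nat => (i : Int) + 1) := by
  simp only [pvG, PySem.List.pyRange_one]
  have : ((m : Int) - 0 + 1 - 1).toNat = m := by omega
  rw [this]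
  apply List.map_congr_left
  intro a _
  ring

theorem pvG_shift (c : Int) (p : Int × Int) : pvG (p.1 + c, p.2 + c) = pvG p := by
  simp only [pvG]
  congr 1
  ring

theorem pvFlatMap_shift (c : Int) : ∀ ps : List (Int × Int),
    (ps.map (fun p => (p.1 + c, p.2 + c))).flatMap pvG = ps.flatMap pvG := by
  intro ps
  induction ps with
  | nil => simp
  | cons p ps ih =>
    simp only [List.map_cons, List.flatMap_cons, ih]
    rw [pvG_shift c p]

theorem pvAdj_map (f : Int → Int) (l : List Int) :
    (l.map f).zip (l.map f).tail = (l.zip l.tail).map (fun p => (f p.1, f p.2)) := by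
  rw [show (l.map f).tail = l.tail.map f by cases l <;> simp, List.zip_map]
  apply List.map_congr_left
  intro a _
  rfl

theorem pvEmit_shift (c : Int) (B : List Int) :
    ((B.map (· + c)).zip (B.map (· + c)).tail).flatMap pvG = (B.zip B.tail).flatMap pvG := by
  rw [pvAdj_map]
  exact pvFlatMap_shift c _

theorem pvEmit_nil : pvEmit [] = [] := by
  simp [pvEmit, pvBounds, pvBreaks, pvGB, PySem.List.enumerate_nil, pvG]

theorem pvEmit_eq_canon : ∀ (n : Nat) (l : List Int), l.length ≤ n → pvEmit l = pvCanon l := by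
  intro n
  induction n with
  | zero =>
    intro l hl
    have hnil : l = [] := List.eq_nil_of_length_eq_zero (Nat.le_zero.mp hl)
    subst hnil
    rw [pvEmit_nil, pvCanon_nil]
  | succ n ih =>
    intro l hl
    match l with
    | [] => rw [pvEmit_nil, pvCanon_nil]
    | x :: xs =>
      have hlen := pvTakeRun_len x xs
      by_cases hrest : (pvTakeRun x xs).2 = []
      · have hl2 : ((x :: xs).length : Int) = (((pvTakeRun x xs).1 + 1 : Nat) : Int) := by
          rw [hrest] at hlen
          simp only [List.length_nil, Nat.add_zero] at hlen
          simp [List.length_cons, hlen]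
        rw [pvCanon_cons, hrest, pvCanon_nil, List.append_nil]
        unfold pvEmit pvBounds
        rw [pvBreaks_run, if_pos hrest]
        simp only [List.nil_append, List.zip_cons_cons, List.tail_cons, List.zip_nil_right,
          List.flatMap_cons, List.flatMap_nil, List.append_nil]
        rw [hl2, pvG_zero]
      · -- bounds (x :: xs) = 0 :: shifted bounds of the rest
        have hb : pvBounds (x :: xs) =
            0 :: (pvBounds (pvTakeRun x xs).2).map (· + (((pvTakeRun x xs).1 : Int) + 1)) := by
          unfold pvBounds
          rw [pvBreaks_run, if_neg hrest]
          have hL : (((x :: xs).length : Nat) : Int) =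
              ((pvTakeRun x xs).2.length : Int) + (((pvTakeRun x xs).1 : Int) + 1) := by
            simp only [List.length_cons]
            push_cast
            omega
          rw [hL]
          simp [List.cons_append, List.map_append]
        rw [pvCanon_cons]
        unfold pvEmit
        rw [hb]
        have key : (((0:Int) :: (pvBounds (pvTakeRun x xs).2).map (· + (((pvTakeRun x xs).1 : Int) + 1))).zip
              (((0:Int) :: (pvBounds (pvTakeRun x xs).2).map (· + (((pvTakeRun x xs).1 : Int) + 1))).tail)).flatMap pvG
            = pvG (0, 0 + (((pvTakeRun x xs).1 : Int) + 1)) ++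
              (((pvBounds (pvTakeRun x xs).2).map (· + (((pvTakeRun x xs).1 : Int) + 1))).zip
                (((pvBounds (pvTakeRun x xs).2).map (· + (((pvTakeRun x xs).1 : Int) + 1))).tail)).flatMap pvG := rfl
        rw [key, pvEmit_shift,
          show (((pvBounds (pvTakeRun x xs).2).zip (pvBounds (pvTakeRun x xs).2).tail).flatMap pvG)
            = pvEmit (pvTakeRun x xs).2 from rfl]
        congr 1
        · rw [show ((0:Int) + (((pvTakeRun x xs).1 : Int) + 1)) = (((pvTakeRun x xs).1 + 1 : Nat) : Int) by push_cast; ring,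
            pvG_zero]
        · apply ih
          have hle := pvTakeRun_len_le x xs
          simp only [List.length_cons] at hl
          omega

theorem pvB_eq_emit (l : List Int) : get_group_rank_alt l = pvEmit l := by
  unfold get_group_rank_alt pvEmit pvBounds pvBreaks pvGB pvF
  rw [PySem.List.slice_from_one, pvFold_pvPairSE]
  simp

theorem pvB_eq_canon (l : List Int) : get_group_rank_alt l = pvCanon l := by
  rw [pvB_eq_emit, pvEmit_eq_canon l.length l (le_refl _)]

-- ===== VERDICT (by name: the statement is the Claim_ definition above) =====
theorem get_group_rank_spec : Claim_equal_get_group_rank := by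
  intro xs _
  unfold Spec_get_group_rank
  rw [pvA_eq_canon, pvB_eq_canon]
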